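-- pv_equiv track=rewrite | github.com/jneug/schule-projekte | Automaten/Python/nka_anbn.py | scan_word
-- ===== SOURCE A (Python) =====
-- def scan_word(state, word, stack):
--     # obersten Kellerbuchstaben "popen" (wenn vorhanden)
--     stack_char = stack.pop(0) if stack else ""
--
--     # Rekursionsabbruch wenn Wort leer (Länge = 0)
--     if len(word) == 0:
--         # Akzeptiert, wenn Automat in Endzustand
--         # (und ggf. bestimmter Kellerzustand), z.B.:
--         return state == 1 and stack_char == "#"
--
--     char = word[0]  # Ersten Buchstaben ist die Eingabe
--     word = word[1:]  # Ersten Buchstaben vom Restwort abtrennen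
--
--     # Übergangsfunktion
--     if state == 0:
--         if stack_char == "#":
--             if char == "a":
--                 return scan_word(0, word, ["A", "#"] + stack)
--         elif stack_char == "A":
--             if char == "a":
--                 return scan_word(0, word, ["A", "A"] + stack)
--             elif char == "b":
--                 return scan_word(1, word, stack)
--     elif state == 1:
--         if stack_char == "A":
--             if char == "b":
--                 return scan_word(1, word, stack)
--
--     # Kein Übergang möglich, Wort nicht akzeptiert
--     return False
-- ===== SOURCE B (Python) =====
-- def scan_word(state, word, stack):
--     # Iterative simulation: the recursion's stack is always k copies of
--     # "A" on top of a suffix stack[j:] of the caller's stack, so we keep just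
--     # the counter k and the index j instead of copying lists.
--     # (Unlike A, this does not mutate the caller's stack; return value only.)
--     k = 0  # number of "A" symbols on top of the virtual stack
--     j = 0  # the rest of the virtual stack is stack[j:]
--     n = len(stack)
--     for ch in word:
--         # pop the top of the virtual stack
--         if k > 0:
--             top = "A"
--             k -= 1
--         elif j < n:
--             top = stack[j]
--             j += 1
--         else:
--             top = ""
--         # transition function
--         if state == 0 and top == "#" and ch == "a":
--             k += 1
--             j -= 1  # the popped "#" is pushed right back
--         elif state == 0 and top == "A" and ch == "a":
--             k += 2  # the popped "A" comes back with one more on top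
--         elif state == 0 and top == "A" and ch == "b":
--             state = 1
--         elif state == 1 and top == "A" and ch == "b":
--             pass
--         else:
--             return False
--     # word exhausted: accept iff final state with "#" on top
--     if k > 0:
--         top = "A"
--     elif j < n:
--         top = stack[j]
--     else:
--         top = ""
--     return state == 1 and top == "#"
-- ===== Notes on version B (the rewrite author's own statement) =====
-- stated objective: alternative
-- what changed: Replaced A's recursion that copies and re-allocates the stack list at every character by a single iterative pass that represents the stack as an integer count of 'A' symbols plus an index into the original stack (no intermediate lists, no recursion; A quadratic only on long accepted words).
import Mathlib
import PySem

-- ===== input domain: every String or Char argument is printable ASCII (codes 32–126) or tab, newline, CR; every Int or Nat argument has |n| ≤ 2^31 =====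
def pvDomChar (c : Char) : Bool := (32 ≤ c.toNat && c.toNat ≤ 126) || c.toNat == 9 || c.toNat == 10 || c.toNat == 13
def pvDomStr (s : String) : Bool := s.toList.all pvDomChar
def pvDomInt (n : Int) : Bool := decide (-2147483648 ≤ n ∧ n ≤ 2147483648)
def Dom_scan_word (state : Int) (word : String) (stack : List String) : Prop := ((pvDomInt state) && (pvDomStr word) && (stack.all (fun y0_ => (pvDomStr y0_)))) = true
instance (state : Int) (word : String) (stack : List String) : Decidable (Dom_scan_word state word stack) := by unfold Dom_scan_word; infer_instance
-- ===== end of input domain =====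

-- B replaces A's recursive list-copying PDA simulation by a one-pass counter/index
-- simulation (objective: alternative — avoids building intermediate stack lists).
-- A mutates the caller's stack by one pop(0); B does not — the equivalence proved
-- here is about the return value only.


-- ===== PORT A =====
-- literal transliteration of A's recursion, on the word's character list
def scanA (state : Int) (w : List Char) (stack0 : List String) : Bool :=
  -- stack_char = stack.pop(0) if stack else ""
  let stack_char := stack0.headD ""
  let stack := stack0.tail
  match w with
  | [] => decide (state = 1 ∧ stack_char = "#")
  | char :: word =>
    if state = 0 then
      if stack_char = "#" then
        (if char = 'a' then scanA 0 word ("A" :: "#" :: stack) else false)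
      else if stack_char = "A" then
        if char = 'a' then scanA 0 word ("A" :: "A" :: stack)
        else if char = 'b' then scanA 1 word stack
        else false
      else false
    else if state = 1 then
      if stack_char = "A" then
        (if char = 'b' then scanA 1 word stack else false)
      else false
    else false

def scan_word (state : Int) (word : String) (stack : List String) : Bool :=
  scanA state word.toList stack

-- ===== PORT B =====
-- literal transliteration of Source B's loop: virtual stack = k copies of "A" on
-- top of stack[j:].  stack[j] is only read under the guard 0 ≤ j < len, where
-- pyGetD is exact Python indexing.
def scanB (state : Int) (w : List Char) (k j : Int) (stack : List String) : Bool :=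
  match w with
  | [] =>
    let top := if 0 < k then "A"
               else if j < (stack.length : Int) then PySem.List.pyGetD stack j ""
               else ""
    decide (state = 1 ∧ top = "#")
  | ch :: rest =>
    let t : String × Int × Int :=
      if 0 < k then ("A", k - 1, j)
      else if j < (stack.length : Int) then (PySem.List.pyGetD stack j "", k, j + 1)
      else ("", k, j)
    if state = 0 ∧ t.1 = "#" ∧ ch = 'a' then scanB 0 rest (t.2.1 + 1) (t.2.2 - 1) stack
    else if state = 0 ∧ t.1 = "A" ∧ ch = 'a' then scanB 0 rest (t.2.1 + 2) t.2.2 stack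
    else if state = 0 ∧ t.1 = "A" ∧ ch = 'b' then scanB 1 rest t.2.1 t.2.2 stack
    else if state = 1 ∧ t.1 = "A" ∧ ch = 'b' then scanB 1 rest t.2.1 t.2.2 stack
    else false

def scan_word_alt (state : Int) (word : String) (stack : List String) : Bool :=
  scanB state word.toList 0 0 stack

-- ===== PRECONDITION & SPEC =====
def Spec_scan_word (state : Int) (word : String) (stack : List String) (out : Bool) : Prop := out = scan_word_alt state word stack
instance (state : Int) (word : String) (stack : List String) (out : Bool) : Decidable (Spec_scan_word state word stack out) := by unfold Spec_scan_word; infer_instance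

-- ===== CLAIM (what is proved, stated in full; the proofs are below) =====
def Claim_equal_scan_word : Prop := ∀ (state : Int) (word : String) (stack : List String), Dom_scan_word state word stack → Spec_scan_word state word stack (scan_word state word stack)

-- ===== LEMMAS AND PROOFS =====

-- the invariant: scanB's (k, j) pair represents the stack list scanA recurses on
theorem scanB_eq_scanA (w : List Char) : ∀ (state k j : Int) (stack : List String),
    0 ≤ k → 0 ≤ j → j ≤ (stack.length : Int) →
    scanB state w k j stack
      = scanA state w (List.replicate k.toNat "A" ++ stack.drop j.toNat) := by
  induction w with
  | nil =>
    intro state k j stack hk hj hjn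
    by_cases hk0 : 0 < k
    · obtain ⟨m, hm⟩ : ∃ m, k.toNat = m + 1 := ⟨k.toNat - 1, by omega⟩
      simp [scanA, scanB, hk0, hm, List.replicate_succ]
    · have hk0' : k.toNat = 0 := by omega
      by_cases hjl : j < (stack.length : Int)
      · have h1 : j.toNat < stack.length := by omega
        have hget : PySem.List.pyGetD stack j "" = stack[j.toNat] :=
          PySem.List.pyGetD_eq_getElem stack "" hj (by omega)
        rw [show (List.replicate k.toNat "A" ++ stack.drop j.toNat)
              = stack[j.toNat] :: stack.drop (j.toNat + 1) by
            rw [hk0', List.drop_eq_getElem_cons h1]; rfl]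
        simp [scanA, scanB, hk0, hjl, hget, List.getElem?_eq_getElem h1]
      · have : stack.length ≤ j.toNat := by omega
        simp [scanA, scanB, hk0, hk0', hjl, List.drop_eq_nil_of_le this]
  | cons ch rest ih =>
    intro state k j stack hk hj hjn
    by_cases hk0 : 0 < k
    · -- top = "A", popped from the counter
      obtain ⟨m, hm⟩ : ∃ m, k.toNat = m + 1 := ⟨k.toNat - 1, by omega⟩
      rw [show (List.replicate k.toNat "A" ++ stack.drop j.toNat)
            = "A" :: (List.replicate m "A" ++ stack.drop j.toNat) by rw [hm]; rfl]
      simp only [scanA, scanB, hk0, if_pos, List.headD_cons, List.tail_cons]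
      have e1 : scanB 0 rest (k - 1 + 2) j stack
          = scanA 0 rest ("A" :: "A" :: (List.replicate m "A" ++ stack.drop j.toNat)) := by
        rw [show k - 1 + 2 = k + 1 by ring, ih 0 (k + 1) j stack (by omega) hj hjn,
          show (k + 1).toNat = m + 2 by omega]
        rfl
      have e2 : scanB 1 rest (k - 1) j stack
          = scanA 1 rest (List.replicate m "A" ++ stack.drop j.toNat) := by
        rw [ih 1 (k - 1) j stack (by omega) hj hjn, show (k - 1).toNat = m by omega]
      by_cases hs0 : state = 0 <;> by_cases hs1 : state = 1 <;>
        by_cases ha : ch = 'a' <;> by_cases hb : ch = 'b' <;>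
          simp_all
    · have hk0' : k.toNat = 0 := by omega
      by_cases hjl : j < (stack.length : Int)
      · -- top = stack[j], popped from the list suffix
        have h1 : j.toNat < stack.length := by omega
        have hget : PySem.List.pyGetD stack j "" = stack[j.toNat] :=
          PySem.List.pyGetD_eq_getElem stack "" hj (by omega)
        have hdrop : stack.drop j.toNat = stack[j.toNat] :: stack.drop (j.toNat + 1) :=
          List.drop_eq_getElem_cons h1
        rw [show (List.replicate k.toNat "A" ++ stack.drop j.toNat)
              = stack[j.toNat] :: stack.drop (j.toNat + 1) by rw [hk0', hdrop]; rfl]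
        simp only [scanA, scanB, hk0, hjl, if_neg, if_pos, hget, List.headD_cons,
          List.tail_cons, not_false_eq_true]
        by_cases hsh : stack[j.toNat] = "#"
        · have e1 : scanB 0 rest (k + 1) (j + 1 - 1) stack
              = scanA 0 rest ("A" :: "#" :: stack.drop (j.toNat + 1)) := by
            rw [ih 0 (k + 1) (j + 1 - 1) stack (by omega) (by omega) (by omega),
              show (k + 1).toNat = 1 by omega, show (j + 1 - 1).toNat = j.toNat by omega,
              hdrop, hsh]
            rfl
          by_cases hs0 : state = 0 <;> by_cases hs1 : state = 1 <;>
            by_cases ha : ch = 'a' <;> simp_all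
        · by_cases hsA : stack[j.toNat] = "A"
          · have e2 : scanB 0 rest (k + 2) (j + 1) stack
                = scanA 0 rest ("A" :: "A" :: stack.drop (j.toNat + 1)) := by
              rw [ih 0 (k + 2) (j + 1) stack (by omega) (by omega) (by omega),
                show (k + 2).toNat = 2 by omega, show (j + 1).toNat = j.toNat + 1 by omega]
              rfl
            have e3 : scanB 1 rest k (j + 1) stack
                = scanA 1 rest (stack.drop (j.toNat + 1)) := by
              rw [ih 1 k (j + 1) stack hk (by omega) (by omega), hk0',
                show (j + 1).toNat = j.toNat + 1 by omega]
              rfl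
            by_cases hs0 : state = 0 <;> by_cases hs1 : state = 1 <;>
              by_cases ha : ch = 'a' <;> by_cases hb : ch = 'b' <;> simp_all
          · by_cases hs0 : state = 0 <;> by_cases hs1 : state = 1 <;> simp_all
      · -- empty virtual stack: top = "", no transition fires on either side
        have : stack.length ≤ j.toNat := by omega
        rw [show (List.replicate k.toNat "A" ++ stack.drop j.toNat) = ([] : List String) by
          rw [hk0', List.drop_eq_nil_of_le this]; rfl]
        simp only [scanA, scanB, hk0, hjl, if_neg, List.headD_nil, List.tail_nil,
          not_false_eq_true]
        by_cases hs0 : state = 0 <;> by_cases hs1 : state = 1 <;> simp_all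

-- ===== VERDICT (by name: the statement is the Claim_ definition above) =====
theorem scan_word_spec : Claim_equal_scan_word := by
  intro state word stack _
  unfold Spec_scan_word scan_word scan_word_alt
  rw [scanB_eq_scanA word.toList state 0 0 stack le_rfl le_rfl (by positivity)]
  rfl
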